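-- pv_equiv track=rewrite | github.com/Hyeonsoek/Problem-solving | BOJ/30000/3000-3999/33562/33562.py | combine_shape
-- ===== SOURCE A (Python) =====
-- def toFloor(iterable):
--     return ''.join(iterable)
--
-- def toShape(iterable):
--     values = []
--     for i in iterable:
--         if i != '--------':
--             values.append(i)
--     return ':'.join(values)
--
-- def floor_to_list(floor : str):
--     return [floor[i:i+2] for i in range(0, 8, 2)]
--
-- def is_combinable(floor1 : str, floor2 : str):
--     xx = floor_to_list(floor1)
--     yy = floor_to_list(floor2)
--     for i in range(4):
--         if xx[i] != '--' and yy[i] != '--':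
--             return False
--     return True
--
-- def find_combinable_depth(n : int, floors1 : list[str], m : int, floors2 : list[str]):
--     s = n - 1
--     k = min(n, m)
--     before, length = 0, 1
--     while s >= 0:
--         for i in range(s, s + length):
--             if not is_combinable(floors1[i], floors2[i - s]):
--                 return s + 1, before
--
--         s -= 1
--         before = length
--         if length < k:
--             length += 1
--
--     return 0, length
--
-- def combine_floor(floor1 : str, floor2 : str):
--     zz = []
--     xx = floor_to_list(floor1)
--     yy = floor_to_list(floor2)
--     for i in range(4):
--         if xx[i] == '--':
--             zz.append(yy[i])
--         else:
--             zz.append(xx[i])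
--
--     return toFloor(zz)
--
-- def combine_shape(shape1 : str, shape2 : str):
--     if shape1 == '' or shape2 == '':
--         return ''
--
--     floors1 = shape1.split(':')
--     floors2 = shape2.split(':')
--     floors3 = []
--
--     n = len(floors1)
--     m = len(floors2)
--
--     s, d = find_combinable_depth(n, floors1, m, floors2)
--
--     for i in range(s):
--         floors3.append(floors1[i])
--
--     for i in range(s, s + d):
--         floors3.append(combine_floor(floors1[i], floors2[i - s]))
--
--     if d < m:
--         for i in range(d, m):
--             floors3.append(floors2[i])
--     else:
--         for i in range(s + d, n):
--             floors3.append(floors1[i])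
--
--     floors3 = floors3[:4]
--     return toShape(floors3)
-- ===== SOURCE B (Python) =====
-- def combine_shape(shape1: str, shape2: str):
--     # Pair-based: the colliding shifts are exactly {i - j} over conflicting floor
--     # pairs; s is 1 + the largest one (first collision from the top), d = min(n-s, m).
--     if shape1 == '' or shape2 == '':
--         return ''
--
--     floors1 = shape1.split(':')
--     floors2 = shape2.split(':')
--     n, m = len(floors1), len(floors2)
--
--     shifts = [i - j for i in range(n) for j in range(m)
--               if j <= i and any(floors1[i][2*q:2*q+2] != '--' and
--                                 floors2[j][2*q:2*q+2] != '--' for q in range(4))]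
--     s = max(shifts) + 1 if shifts else 0
--     d = min(n - s, m)
--
--     merged = [''.join(floors2[i][2*q:2*q+2]
--                       if floors1[s + i][2*q:2*q+2] == '--'
--                       else floors1[s + i][2*q:2*q+2] for q in range(4))
--               for i in range(d)]
--     rest = floors2[d:] if d < m else floors1[s + d:]
--     floors3 = (floors1[:s] + merged + rest)[:4]
--     return ':'.join(f for f in floors3 if f != '--------')
-- ===== Notes on version B (the rewrite author's own statement) =====
-- stated objective: alternative
-- what changed: A finds the stacking depth with a top-down shrinking-window scan (an early-returning while loop re-testing floor windows shift by shift); B instead enumerates all conflicting floor pairs once and takes s = 1 + max{i - j} over them (0 if none), then assembles the result with slices and a single merged-floor map.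
import Mathlib
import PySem

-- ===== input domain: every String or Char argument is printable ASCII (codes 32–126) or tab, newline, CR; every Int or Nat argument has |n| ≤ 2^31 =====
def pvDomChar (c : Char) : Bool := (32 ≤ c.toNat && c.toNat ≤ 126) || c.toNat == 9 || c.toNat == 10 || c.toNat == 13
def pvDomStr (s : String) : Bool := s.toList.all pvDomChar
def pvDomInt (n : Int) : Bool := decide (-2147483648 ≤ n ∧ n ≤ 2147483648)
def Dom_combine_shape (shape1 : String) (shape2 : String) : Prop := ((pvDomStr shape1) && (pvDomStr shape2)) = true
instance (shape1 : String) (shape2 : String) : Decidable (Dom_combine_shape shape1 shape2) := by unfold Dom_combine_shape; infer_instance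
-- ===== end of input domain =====

-- B replaces A's shrinking-window scan over shifts by the set of colliding shifts {i - j}
-- taken over conflicting floor pairs (s = 1 + its maximum); same cost class, different decomposition.

-- ===== PORT A =====
def toFloorA (iterable : List (List Char)) : List Char := PySem.Chars.join [] iterable

def toShapeA (iterable : List (List Char)) : List Char :=
  PySem.Chars.join [':']
    (iterable.foldl (fun values i =>
      if i ≠ ['-','-','-','-','-','-','-','-'] then values ++ [i] else values) [])

def floorToListA (floor : List Char) : List (List Char) :=
  (PySem.List.pyRange 0 8 2).map (fun i => PySem.List.slice floor (some i) (some (i + 2)))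

def isCombinable (floor1 floor2 : List Char) : Bool :=
  let xx := floorToListA floor1
  let yy := floorToListA floor2
  (PySem.List.pyRange 0 4).foldl (fun r i =>
    if PySem.List.pyGetD xx i [] ≠ ['-','-'] ∧ PySem.List.pyGetD yy i [] ≠ ['-','-'] then false
    else r) true

def fcdLoop (floors1 floors2 : List (List Char)) (k : Int) :
    Nat → Int → Int → Int → Int × Int
  | 0, _s, _before, length => (0, length)
  | fuel + 1, s, before, length =>
    if (PySem.List.pyRange s (s + length)).any (fun i =>
        !isCombinable (PySem.List.pyGetD floors1 i []) (PySem.List.pyGetD floors2 (i - s) []))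
    then (s + 1, before)
    else fcdLoop floors1 floors2 k fuel (s - 1) length (if length < k then length + 1 else length)

def findCombinableDepth (n : Int) (floors1 : List (List Char)) (m : Int)
    (floors2 : List (List Char)) : Int × Int :=
  fcdLoop floors1 floors2 (min n m) n.toNat (n - 1) 0 1

def combineFloorA (floor1 floor2 : List Char) : List Char :=
  let xx := floorToListA floor1
  let yy := floorToListA floor2
  let zz := (PySem.List.pyRange 0 4).foldl (fun zz i =>
    if PySem.List.pyGetD xx i [] = ['-','-'] then zz ++ [PySem.List.pyGetD yy i []]
    else zz ++ [PySem.List.pyGetD xx i []]) []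
  toFloorA zz

def combine_shape (shape1 : String) (shape2 : String) : String :=
  if shape1 = "" ∨ shape2 = "" then "" else
  let floors1 := PySem.Chars.splitOn shape1.toList [':']
  let floors2 := PySem.Chars.splitOn shape2.toList [':']
  let n : Int := PySem.List.len floors1
  let m : Int := PySem.List.len floors2
  let sd := findCombinableDepth n floors1 m floors2
  let s := sd.1
  let d := sd.2
  let f3a := (PySem.List.pyRange 0 s).foldl
    (fun acc i => acc ++ [PySem.List.pyGetD floors1 i []]) []
  let f3b := (PySem.List.pyRange s (s + d)).foldl
    (fun acc i => acc ++ [combineFloorA (PySem.List.pyGetD floors1 i [])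
                                        (PySem.List.pyGetD floors2 (i - s) [])]) f3a
  let f3c :=
    if d < m then
      (PySem.List.pyRange d m).foldl (fun acc i => acc ++ [PySem.List.pyGetD floors2 i []]) f3b
    else
      (PySem.List.pyRange (s + d) n).foldl (fun acc i => acc ++ [PySem.List.pyGetD floors1 i []]) f3b
  let f3 := PySem.List.slice f3c none (some 4)
  String.ofList (toShapeA f3)

-- ===== PORT B =====
def slotB (f : List Char) (q : Int) : List Char :=
  PySem.List.slice f (some (2 * q)) (some (2 * q + 2))

def conflictB (f1 f2 : List Char) : Bool :=
  (PySem.List.pyRange 0 4).any (fun q =>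
    decide (slotB f1 q ≠ ['-','-'] ∧ slotB f2 q ≠ ['-','-']))

def shiftsB (floors1 floors2 : List (List Char)) (n m : Int) : List Int :=
  (PySem.List.pyRange 0 n).flatMap (fun i =>
    ((PySem.List.pyRange 0 m).filter (fun j =>
      decide (j ≤ i) && conflictB (PySem.List.pyGetD floors1 i []) (PySem.List.pyGetD floors2 j []))).map
      (fun j => i - j))

def mergeFloorB (f1 f2 : List Char) : List Char :=
  PySem.Chars.join [] ((PySem.List.pyRange 0 4).map (fun q =>
    if slotB f1 q = ['-','-'] then slotB f2 q else slotB f1 q))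

def combine_shape_alt (shape1 : String) (shape2 : String) : String :=
  if shape1 = "" ∨ shape2 = "" then "" else
  let floors1 := PySem.Chars.splitOn shape1.toList [':']
  let floors2 := PySem.Chars.splitOn shape2.toList [':']
  let n : Int := PySem.List.len floors1
  let m : Int := PySem.List.len floors2
  let s : Int :=
    match PySem.List.max? (shiftsB floors1 floors2 n m) (fun t => t) with
    | some t => t + 1
    | none => 0
  let d := min (n - s) m
  let merged := (PySem.List.pyRange 0 d).map (fun i =>
    mergeFloorB (PySem.List.pyGetD floors1 (s + i) []) (PySem.List.pyGetD floors2 i []))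
  let rest :=
    if d < m then PySem.List.slice floors2 (some d) none
    else PySem.List.slice floors1 (some (s + d)) none
  let f3 := PySem.List.slice (PySem.List.slice floors1 none (some s) ++ merged ++ rest) none (some 4)
  String.ofList (PySem.Chars.join [':'] (f3.filter (fun f =>
    decide (f ≠ ['-','-','-','-','-','-','-','-']))))

-- ===== PRECONDITION & SPEC =====
def Spec_combine_shape (shape1 : String) (shape2 : String) (out : String) : Prop := out = combine_shape_alt shape1 shape2
instance (shape1 : String) (shape2 : String) (out : String) : Decidable (Spec_combine_shape shape1 shape2 out) := by unfold Spec_combine_shape; infer_instance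

-- ===== CLAIM (what is proved, stated in full; the proofs are below) =====
def Claim_equal_combine_shape : Prop := ∀ (shape1 : String) (shape2 : String), Dom_combine_shape shape1 shape2 → Spec_combine_shape shape1 shape2 (combine_shape shape1 shape2)

-- ===== LEMMAS AND PROOFS =====

theorem floorToListA_eq (f : List Char) :
    floorToListA f = [slotB f 0, slotB f 1, slotB f 2, slotB f 3] := by
  simp [floorToListA, slotB, show PySem.List.pyRange 0 8 2 = [0,2,4,6] from by decide]

theorem conflictB_eq (f1 f2 : List Char) :
    conflictB f1 f2 = !isCombinable f1 f2 := by
  rw [conflictB, isCombinable]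
  rw [show PySem.List.pyRange 0 4 = [0,1,2,3] from by decide]
  simp only [floorToListA_eq, List.any, List.foldl]
  simp only [show ∀ (a b c d : List Char), PySem.List.pyGetD [a,b,c,d] 0 [] = a from by intros; rfl,
    show ∀ (a b c d : List Char), PySem.List.pyGetD [a,b,c,d] 1 [] = b from by intros; rfl,
    show ∀ (a b c d : List Char), PySem.List.pyGetD [a,b,c,d] 2 [] = c from by intros; rfl,
    show ∀ (a b c d : List Char), PySem.List.pyGetD [a,b,c,d] 3 [] = d from by intros; rfl]
  by_cases h0 : slotB f1 0 = ['-','-'] <;>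
  by_cases h1 : slotB f1 1 = ['-','-'] <;>
  by_cases h2 : slotB f1 2 = ['-','-'] <;>
  by_cases h3 : slotB f1 3 = ['-','-'] <;>
  by_cases g0 : slotB f2 0 = ['-','-'] <;>
  by_cases g1 : slotB f2 1 = ['-','-'] <;>
  by_cases g2 : slotB f2 2 = ['-','-'] <;>
  by_cases g3 : slotB f2 3 = ['-','-'] <;>
  simp [h0, h1, h2, h3, g0, g1, g2, g3]

theorem combineFloorA_eq (f1 f2 : List Char) :
    combineFloorA f1 f2 = mergeFloorB f1 f2 := by
  rw [combineFloorA, mergeFloorB, toFloorA]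
  rw [show PySem.List.pyRange 0 4 = [0,1,2,3] from by decide]
  simp only [floorToListA_eq, List.foldl, List.map]
  simp only [show ∀ (a b c d : List Char), PySem.List.pyGetD [a,b,c,d] 0 [] = a from by intros; rfl,
    show ∀ (a b c d : List Char), PySem.List.pyGetD [a,b,c,d] 1 [] = b from by intros; rfl,
    show ∀ (a b c d : List Char), PySem.List.pyGetD [a,b,c,d] 2 [] = c from by intros; rfl,
    show ∀ (a b c d : List Char), PySem.List.pyGetD [a,b,c,d] 3 [] = d from by intros; rfl]
  by_cases h0 : slotB f1 0 = ['-','-'] <;>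
  by_cases h1 : slotB f1 1 = ['-','-'] <;>
  by_cases h2 : slotB f1 2 = ['-','-'] <;>
  by_cases h3 : slotB f1 3 = ['-','-'] <;>
  simp [h0, h1, h2, h3]
def Collide (floors1 floors2 : List (List Char)) (t : Int) : Prop :=
  ∃ i j : Int, 0 ≤ j ∧ j ≤ i ∧ i < (floors1.length : Int) ∧ j < (floors2.length : Int) ∧
    i - j = t ∧
    conflictB (PySem.List.pyGetD floors1 i []) (PySem.List.pyGetD floors2 j []) = true

theorem mem_shiftsB (floors1 floors2 : List (List Char)) (t : Int) :
    t ∈ shiftsB floors1 floors2 floors1.length floors2.length ↔ Collide floors1 floors2 t := by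
  simp only [shiftsB, List.mem_flatMap, List.mem_map, List.mem_filter,
    PySem.List.mem_pyRange_one, Bool.and_eq_true, decide_eq_true_eq, Collide]
  constructor
  · rintro ⟨i, ⟨hi0, hin⟩, j, ⟨⟨⟨hj0, hjm⟩, hji, hconf⟩, rfl⟩⟩
    exact ⟨i, j, hj0, hji, hin, hjm, rfl, hconf⟩
  · rintro ⟨i, j, hj0, hji, hin, hjm, rfl, hconf⟩
    exact ⟨i, ⟨le_trans hj0 hji, hin⟩, j, ⟨⟨⟨hj0, hjm⟩, hji, hconf⟩, rfl⟩⟩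
theorem window_iff (floors1 floors2 : List (List Char)) (s : Int) (hs0 : 0 ≤ s) :
    (((PySem.List.pyRange s (s + min ((floors1.length : Int) - s) (min ((floors1.length : Int)) ((floors2.length : Int))))).any (fun i =>
      !isCombinable (PySem.List.pyGetD floors1 i []) (PySem.List.pyGetD floors2 (i - s) []))) = true)
    ↔ Collide floors1 floors2 s := by
  simp only [List.any_eq_true, PySem.List.mem_pyRange_one, ← conflictB_eq, Collide]
  constructor
  · rintro ⟨i, ⟨his, hilt⟩, hconf⟩
    exact ⟨i, i - s, by omega, by omega, by omega, by omega, by omega, hconf⟩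
  · rintro ⟨i, j, hj0, hji, hin, hjm, hijs, hconf⟩
    refine ⟨i, ⟨by omega, by omega⟩, ?_⟩
    rwa [show i - s = j from by omega]
def sB (floors1 floors2 : List (List Char)) : Int :=
  match PySem.List.max? (shiftsB floors1 floors2 floors1.length floors2.length) (fun t => t) with
  | some t => t + 1
  | none => 0

theorem collide_nonneg {floors1 floors2 : List (List Char)} {t : Int}
    (h : Collide floors1 floors2 t) : 0 ≤ t ∧ t < (floors1.length : Int) := by
  obtain ⟨i, j, h1, h2, h3, h4, h5, _⟩ := h; omega

theorem sB_bounds (floors1 floors2 : List (List Char)) :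
    0 ≤ sB floors1 floors2 ∧ sB floors1 floors2 ≤ (floors1.length : Int) := by
  rw [sB]
  rcases hmx : PySem.List.max? (shiftsB floors1 floors2 floors1.length floors2.length)
      (fun t => t) with _ | T
  · simp
  · have hT := PySem.List.max?_mem hmx
    rw [mem_shiftsB] at hT
    have := collide_nonneg hT
    simp; omega

theorem collide_lt_sB {floors1 floors2 : List (List Char)} {t : Int}
    (h : Collide floors1 floors2 t) : t < sB floors1 floors2 := by
  rw [sB]
  rcases hmx : PySem.List.max? (shiftsB floors1 floors2 floors1.length floors2.length)
      (fun t => t) with _ | T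
  · rw [PySem.List.max?_eq_none_iff] at hmx
    rw [← mem_shiftsB] at h
    simp [hmx] at h
  · have := PySem.List.max?_isMax hmx t (by rw [mem_shiftsB]; exact h)
    simpa using by omega
  
theorem sB_pos_collide {floors1 floors2 : List (List Char)}
    (h : 0 < sB floors1 floors2) : Collide floors1 floors2 (sB floors1 floors2 - 1) := by
  rw [sB] at h ⊢
  rcases hmx : PySem.List.max? (shiftsB floors1 floors2 floors1.length floors2.length)
      (fun t => t) with _ | T
  · simp [hmx] at h
  · have hT := PySem.List.max?_mem hmx
    rw [mem_shiftsB] at hT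
    simpa [hmx] using hT

theorem sB_eq_zero {floors1 floors2 : List (List Char)}
    (h : ∀ t : Int, ¬ Collide floors1 floors2 t) : sB floors1 floors2 = 0 := by
  rw [sB]
  rcases hmx : PySem.List.max? (shiftsB floors1 floors2 floors1.length floors2.length)
      (fun t => t) with _ | T
  · rfl
  · have hT := PySem.List.max?_mem hmx
    rw [mem_shiftsB] at hT
    exact absurd hT (h T)


theorem fcd_spec (floors1 floors2 : List (List Char)) (c : Nat)
    (hc : (c : Int) ≤ (floors1.length : Int))
    (habove : ∀ t : Int, (c : Int) ≤ t → ¬ Collide floors1 floors2 t) :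
    fcdLoop floors1 floors2 (min (floors1.length : Int) (floors2.length : Int)) c ((c : Int) - 1)
      (min ((floors1.length : Int) - (c : Int)) (min (floors1.length : Int) (floors2.length : Int)))
      (min ((floors1.length : Int) - (c : Int) + 1) (min (floors1.length : Int) (floors2.length : Int)))
    = (sB floors1 floors2,
       min ((floors1.length : Int) - sB floors1 floors2) (floors2.length : Int)) := by
  induction c with
  | zero =>
    have hz : sB floors1 floors2 = 0 := by
      apply sB_eq_zero
      intro t ht
      rcases collide_nonneg ht with ⟨h0, _⟩
      exact habove t (by omega) ht
    simp only [fcdLoop, Nat.cast_zero]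
    rw [hz]
    congr 1
    omega
  | succ c ih =>
    have hcast : (((c + 1 : Nat)) : Int) - 1 = (c : Int) := by push_cast; ring
    rw [fcdLoop, hcast]
    have hlen : min ((floors1.length : Int) - ((c+1 : Nat) : Int) + 1)
        (min (floors1.length : Int) (floors2.length : Int))
      = min ((floors1.length : Int) - (c : Int)) (min (floors1.length : Int) (floors2.length : Int)) := by
      push_cast; omega
    rw [hlen]
    have hc' : (c : Int) + 1 ≤ (floors1.length : Int) := by push_cast at hc; omega
    by_cases hfail : ((PySem.List.pyRange ((c : Int)) ((c : Int) + min ((floors1.length : Int) - (c : Int)) (min (floors1.length : Int) (floors2.length : Int)))).any fun i =>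
        !isCombinable (PySem.List.pyGetD floors1 i []) (PySem.List.pyGetD floors2 (i - (c : Int)) [])) = true
    · rw [if_pos hfail]
      rw [window_iff floors1 floors2 (c : Int) (by omega)] at hfail
      have hlt : (c : Int) < sB floors1 floors2 := collide_lt_sB hfail
      have hle : sB floors1 floors2 ≤ (c : Int) + 1 := by
        by_contra hgt
        have hcol := sB_pos_collide (show (0:Int) < sB floors1 floors2 from by omega)
        exact habove _ (by push_cast; omega) hcol
      have hsb : sB floors1 floors2 = (c : Int) + 1 := by omega
      rw [hsb]
      have h2 : min ((floors1.length : Int) - ((c+1 : Nat) : Int))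
          (min (floors1.length : Int) (floors2.length : Int))
        = min ((floors1.length : Int) - ((c : Int) + 1)) (floors2.length : Int) := by
        push_cast; omega
      rw [h2]
    · rw [if_neg hfail]
      rw [window_iff floors1 floors2 (c : Int) (by omega)] at hfail
      have habove2 : ∀ t : Int, (c : Int) ≤ t → ¬ Collide floors1 floors2 t := by
        intro t ht
        rcases eq_or_lt_of_le ht with heq | hlt
        · rw [← heq]; exact hfail
        · exact habove t (by push_cast; omega)
      have harg2 : (if min ((floors1.length : Int) - (c : Int)) (min (floors1.length : Int) (floors2.length : Int)) < min (floors1.length : Int) (floors2.length : Int)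
          then min ((floors1.length : Int) - (c : Int)) (min (floors1.length : Int) (floors2.length : Int)) + 1
          else min ((floors1.length : Int) - (c : Int)) (min (floors1.length : Int) (floors2.length : Int)))
        = min ((floors1.length : Int) - (c : Int) + 1) (min (floors1.length : Int) (floors2.length : Int)) := by
        split_ifs <;> omega
      rw [harg2]
      exact ih (by omega) habove2
theorem splitOn_go_len (sep : List Char) (fuel : Nat) (l cur : List Char) (acc : List (List Char)) :
    acc.length < (PySem.Chars.splitOn.go sep fuel l cur acc).length := by
  induction fuel generalizing l cur acc with
  | zero => simp [PySem.Chars.splitOn.go]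
  | succ fuel ih =>
    cases l with
    | nil => simp [PySem.Chars.splitOn.go]
    | cons c rest =>
      rw [PySem.Chars.splitOn.go]
      split_ifs with h
      · exact lt_trans (by simp) (ih _ _ _)
      · exact ih _ _ _

theorem splitOn_pos (s sep : List Char) : 1 ≤ (PySem.Chars.splitOn s sep).length := by
  have := splitOn_go_len sep (s.length + 1) s [] []
  simpa [PySem.Chars.splitOn] using this

theorem map_pyGetD_range (xs : List (List Char)) (a b : Int) (h0 : 0 ≤ a)
    (hb : b ≤ (xs.length : Int)) :
    (PySem.List.pyRange a b).map (fun i => PySem.List.pyGetD xs i [])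
      = (xs.drop a.toNat).take (b - a).toNat := by
  rw [PySem.List.pyRange_one, List.map_map]
  apply List.ext_getElem
  · simp; omega
  · intro k hk1 hk2
    simp only [List.getElem_map, List.getElem_range, Function.comp_apply,
      List.getElem_take, List.getElem_drop]
    simp only [List.length_map, List.length_range] at hk1
    rw [PySem.List.pyGetD_eq_getElem xs [] (by omega) (by omega)]
    congr 1
    omega

theorem map_mid (fl1 fl2 : List (List Char)) (S d : Int) :
    (PySem.List.pyRange S (S + d)).map (fun i =>
      combineFloorA (PySem.List.pyGetD fl1 i []) (PySem.List.pyGetD fl2 (i - S) []))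
    = (PySem.List.pyRange 0 d).map (fun i =>
      mergeFloorB (PySem.List.pyGetD fl1 (S + i) []) (PySem.List.pyGetD fl2 i [])) := by
  rw [PySem.List.pyRange_one, PySem.List.pyRange_one, List.map_map, List.map_map]
  rw [show S + d - S = d - 0 from by ring]
  apply List.map_congr_left
  intro k _
  simp only [Function.comp_apply]
  rw [combineFloorA_eq]
  rw [show S + (k : Int) - S = (k : Int) from by ring, zero_add]
theorem core (fl1 fl2 : List (List Char)) (hn : 1 ≤ fl1.length) (hm : 1 ≤ fl2.length) :
    String.ofList (toShapeA (PySem.List.slice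
      (if (findCombinableDepth (fl1.length : Int) fl1 (fl2.length : Int) fl2).2 < (fl2.length : Int) then
        (PySem.List.pyRange (findCombinableDepth (fl1.length : Int) fl1 (fl2.length : Int) fl2).2 (fl2.length : Int)).foldl
          (fun acc i => acc ++ [PySem.List.pyGetD fl2 i []])
          ((PySem.List.pyRange (findCombinableDepth (fl1.length : Int) fl1 (fl2.length : Int) fl2).1
              ((findCombinableDepth (fl1.length : Int) fl1 (fl2.length : Int) fl2).1 +
               (findCombinableDepth (fl1.length : Int) fl1 (fl2.length : Int) fl2).2)).foldl
            (fun acc i => acc ++ [combineFloorA (PySem.List.pyGetD fl1 i [])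
              (PySem.List.pyGetD fl2 (i - (findCombinableDepth (fl1.length : Int) fl1 (fl2.length : Int) fl2).1) [])])
            ((PySem.List.pyRange 0 (findCombinableDepth (fl1.length : Int) fl1 (fl2.length : Int) fl2).1).foldl
              (fun acc i => acc ++ [PySem.List.pyGetD fl1 i []]) []))
      else
        (PySem.List.pyRange ((findCombinableDepth (fl1.length : Int) fl1 (fl2.length : Int) fl2).1 +
            (findCombinableDepth (fl1.length : Int) fl1 (fl2.length : Int) fl2).2) (fl1.length : Int)).foldl
          (fun acc i => acc ++ [PySem.List.pyGetD fl1 i []])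
          ((PySem.List.pyRange (findCombinableDepth (fl1.length : Int) fl1 (fl2.length : Int) fl2).1
              ((findCombinableDepth (fl1.length : Int) fl1 (fl2.length : Int) fl2).1 +
               (findCombinableDepth (fl1.length : Int) fl1 (fl2.length : Int) fl2).2)).foldl
            (fun acc i => acc ++ [combineFloorA (PySem.List.pyGetD fl1 i [])
              (PySem.List.pyGetD fl2 (i - (findCombinableDepth (fl1.length : Int) fl1 (fl2.length : Int) fl2).1) [])])
            ((PySem.List.pyRange 0 (findCombinableDepth (fl1.length : Int) fl1 (fl2.length : Int) fl2).1).foldl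
              (fun acc i => acc ++ [PySem.List.pyGetD fl1 i []]) [])))
      none (some 4)))
    = String.ofList (PySem.Chars.join [':'] ((PySem.List.slice
        (PySem.List.slice fl1 none (some (sB fl1 fl2)) ++
          (PySem.List.pyRange 0 (min ((fl1.length : Int) - sB fl1 fl2) (fl2.length : Int))).map (fun i =>
            mergeFloorB (PySem.List.pyGetD fl1 (sB fl1 fl2 + i) []) (PySem.List.pyGetD fl2 i [])) ++
          (if min ((fl1.length : Int) - sB fl1 fl2) (fl2.length : Int) < (fl2.length : Int) then
            PySem.List.slice fl2 (some (min ((fl1.length : Int) - sB fl1 fl2) (fl2.length : Int))) none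
          else
            PySem.List.slice fl1 (some (sB fl1 fl2 + min ((fl1.length : Int) - sB fl1 fl2) (fl2.length : Int))) none))
        none (some 4)).filter (fun f => decide (f ≠ ['-','-','-','-','-','-','-','-'])))) := by
  have hnz : (1 : Int) ≤ (fl1.length : Int) := by exact_mod_cast hn
  have hmz : (1 : Int) ≤ (fl2.length : Int) := by exact_mod_cast hm
  have hsb := sB_bounds fl1 fl2
  have hA : findCombinableDepth (fl1.length : Int) fl1 (fl2.length : Int) fl2
      = (sB fl1 fl2, min ((fl1.length : Int) - sB fl1 fl2) (fl2.length : Int)) := by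
    have habove : ∀ t : Int, ((fl1.length : Nat) : Int) ≤ t → ¬ Collide fl1 fl2 t := by
      intro t ht hcol
      have := collide_nonneg hcol
      omega
    have h := fcd_spec fl1 fl2 fl1.length le_rfl habove
    have e0 : min ((fl1.length : Int) - (fl1.length : Int))
        (min (fl1.length : Int) (fl2.length : Int)) = 0 := by omega
    have e1 : min ((fl1.length : Int) - (fl1.length : Int) + 1)
        (min (fl1.length : Int) (fl2.length : Int)) = 1 := by omega
    rw [e0, e1] at h
    rw [findCombinableDepth]
    simpa [PySem.List.len_eq] using h
  rw [hA]
  simp only [PySem.List.foldl_append_singleton_eq_map, List.nil_append]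
  have hd0 : 0 ≤ min ((fl1.length : Int) - sB fl1 fl2) (fl2.length : Int) := by omega
  have hpre : (PySem.List.pyRange 0 (sB fl1 fl2)).map (fun i => PySem.List.pyGetD fl1 i [])
      = PySem.List.slice fl1 none (some (sB fl1 fl2)) := by
    rw [map_pyGetD_range fl1 0 (sB fl1 fl2) le_rfl hsb.2,
        PySem.List.slice_to fl1 hsb.1]
    simp
  have hmid := map_mid fl1 fl2 (sB fl1 fl2) (min ((fl1.length : Int) - sB fl1 fl2) (fl2.length : Int))
  rw [hpre, hmid]
  by_cases hdm : min ((fl1.length : Int) - sB fl1 fl2) (fl2.length : Int) < (fl2.length : Int)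
  · rw [if_pos hdm, if_pos hdm]
    have htail : (PySem.List.pyRange (min ((fl1.length : Int) - sB fl1 fl2) (fl2.length : Int)) (fl2.length : Int)).map
        (fun i => PySem.List.pyGetD fl2 i [])
        = PySem.List.slice fl2 (some (min ((fl1.length : Int) - sB fl1 fl2) (fl2.length : Int))) none := by
      rw [map_pyGetD_range fl2 _ _ hd0 le_rfl,
          PySem.List.slice_from fl2 hd0]
      apply List.take_of_length_le
      simp
      omega
    rw [htail, toShapeA, PySem.List.foldl_append_ite_eq_filter, List.nil_append, List.append_assoc]
  · rw [if_neg hdm, if_neg hdm]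
    have htail : (PySem.List.pyRange (sB fl1 fl2 + min ((fl1.length : Int) - sB fl1 fl2) (fl2.length : Int)) (fl1.length : Int)).map
        (fun i => PySem.List.pyGetD fl1 i [])
        = PySem.List.slice fl1 (some (sB fl1 fl2 + min ((fl1.length : Int) - sB fl1 fl2) (fl2.length : Int))) none := by
      rw [map_pyGetD_range fl1 _ _ (by omega) le_rfl,
          PySem.List.slice_from fl1 (by omega)]
      apply List.take_of_length_le
      simp
      omega
    rw [htail, toShapeA, PySem.List.foldl_append_ite_eq_filter, List.nil_append, List.append_assoc]

theorem combine_eq (shape1 shape2 : String) :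
    combine_shape shape1 shape2 = combine_shape_alt shape1 shape2 := by
  rw [combine_shape, combine_shape_alt]
  by_cases hg : shape1 = "" ∨ shape2 = ""
  · rw [if_pos hg, if_pos hg]
  · rw [if_neg hg, if_neg hg]
    exact core (PySem.Chars.splitOn shape1.toList [':']) (PySem.Chars.splitOn shape2.toList [':'])
      (splitOn_pos _ _) (splitOn_pos _ _)

-- ===== VERDICT (by name: the statement is the Claim_ definition above) =====
theorem combine_shape_spec : Claim_equal_combine_shape := by
  intro shape1 shape2 _hdom
  exact combine_eq shape1 shape2
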